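-- pv_equiv track=rewrite | github.com/KonstantinosNakas/ProjectEuler-Python-Solutions | 46.py | CanBeWritten
-- ===== SOURCE A (Python) =====
-- def CanBeWritten(n,num):
-- 	i = 2
-- 	while(n>i):
-- 		if (num[i] == False):
-- 			i = i + 1
-- 			continue
-- 		flag = 0
-- 		for j in range(1,n):
-- 			if (n == i+(2*j*j)):
-- 				flag = 1;
-- 				break
-- 			if (n < i+(2*j*j)):
-- 				break
-- 		if (flag == 1):
-- 			return True
-- 		else:
-- 			i = i + 1
-- 			continue
-- 	return False
-- ===== SOURCE B (Python) =====
-- def CanBeWritten(n, num):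
--     j = 1
--     while n - 2 * j * j >= 2:
--         if num[n - 2 * j * j]:
--             return True
--         j += 1
--     return False
-- ===== Notes on version B (the rewrite author's own statement) =====
-- stated objective: faster
-- what changed: Instead of scanning every candidate prime i in [2,n) and for each searching j with n == i+2j^2 (nested loops), B iterates only over j >= 1 with 2j^2 <= n-2 and checks the single table entry num[n-2j^2], removing the inner scan entirely.
-- outside the precondition, e.g. on CanBeWritten(10, [False, False, True]): A returns True, B raises IndexError
import Mathlib
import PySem

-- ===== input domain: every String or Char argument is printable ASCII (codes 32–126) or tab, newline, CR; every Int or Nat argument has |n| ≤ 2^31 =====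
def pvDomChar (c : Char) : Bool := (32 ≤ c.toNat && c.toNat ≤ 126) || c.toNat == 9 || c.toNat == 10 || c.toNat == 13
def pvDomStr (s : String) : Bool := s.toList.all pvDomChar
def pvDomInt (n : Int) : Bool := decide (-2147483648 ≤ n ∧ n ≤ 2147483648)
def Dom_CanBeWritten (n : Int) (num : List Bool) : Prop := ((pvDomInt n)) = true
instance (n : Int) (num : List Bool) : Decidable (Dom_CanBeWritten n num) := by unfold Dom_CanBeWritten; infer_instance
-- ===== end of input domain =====

-- B replaces A's nested scan (every i in [2,n), inner search for j) by a single loop over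
-- the squares j with 2*j*j <= n-2, looking up num[n-2*j*j] directly (measured faster, asymptotic).


-- ===== PORT A =====
-- A's inner 'for j in range(1,n)' loop: returns the final flag (break on n < i+2j²)
def pvJScan (n i : Int) : List Int → Bool
  | [] => false
  | j :: rest =>
    if n = i + 2*j*j then true
    else if n < i + 2*j*j then false
    else pvJScan n i rest

-- A's outer 'while n > i' loop; fuel counts the remaining iterations (i increases by 1 each step).
-- num[i] is ported as pyGetD (Python raises out of range; Pre_ keeps the index in range).
def pvALoop (n : Int) (num : List Bool) (i : Int) : Nat → Bool
  | 0 => false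
  | fuel+1 =>
    if n > i then
      if PySem.List.pyGetD num i false = false then pvALoop n num (i+1) fuel
      else if pvJScan n i (PySem.List.pyRange 1 n 1) then true
      else pvALoop n num (i+1) fuel
    else false

def CanBeWritten (n : Int) (num : List Bool) : Bool :=
  pvALoop n num 2 (n-2).toNat

-- ===== PORT B =====
-- B's 'while n - 2*j*j >= 2' loop; fuel (n-2).toNat is enough: after it runs out the guard is false.
def pvBLoop (n : Int) (num : List Bool) (j : Int) : Nat → Bool
  | 0 => false
  | fuel+1 =>
    if n - 2*j*j ≥ 2 then
      if PySem.List.pyGetD num (n - 2*j*j) false = true then true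
      else pvBLoop n num (j+1) fuel
    else false

def CanBeWritten_alt (n : Int) (num : List Bool) : Bool :=
  pvBLoop n num 1 (n-2).toNat

-- ===== PRECONDITION & SPEC =====
-- Pre_ excludes inputs where either Python indexes num out of range (IndexError): A reads num[i]
-- for i up to n-1, so it needs n ≤ len(num) whenever n > 2; this also excludes inputs where A
-- happens to return True early on a short num (e.g. (10,[False,False,True])) while B would raise.
def Pre_CanBeWritten (n : Int) (num : List Bool) : Prop :=
  n ≤ 2 ∨ n ≤ (num.length : Int)
instance (n : Int) (num : List Bool) : Decidable (Pre_CanBeWritten n num) := by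
  unfold Pre_CanBeWritten; infer_instance

def pvWitness_CanBeWritten : Int × List Bool :=
  (9, [false, false, true, true, false, true, false, true, false])

def Spec_CanBeWritten (n : Int) (num : List Bool) (out : Bool) : Prop := out = CanBeWritten_alt n num
instance (n : Int) (num : List Bool) (out : Bool) : Decidable (Spec_CanBeWritten n num out) := by unfold Spec_CanBeWritten; infer_instance

-- ===== CLAIM (what is proved, stated in full; the proofs are below) =====
def Claim_equal_CanBeWritten : Prop := ∀ (n : Int) (num : List Bool), Dom_CanBeWritten n num → Pre_CanBeWritten n num → Spec_CanBeWritten n num (CanBeWritten n num)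

-- ===== LEMMAS AND PROOFS =====

-- The j-scan over range(a,b) finds a hit iff one exists: the break is safe because 2j² is
-- strictly increasing for j ≥ 0.
theorem pvJScan_iff (n i a b : Int) (ha : 0 ≤ a) :
    pvJScan n i (PySem.List.pyRange a b 1) = true ↔
      ∃ j : Int, a ≤ j ∧ j < b ∧ n = i + 2*j*j := by
  -- induction on (b - a).toNat generalizing a
  have key : ∀ (k : Nat) (a : Int), 0 ≤ a → (b - a).toNat = k →
      (pvJScan n i (PySem.List.pyRange a b 1) = true ↔
        ∃ j : Int, a ≤ j ∧ j < b ∧ n = i + 2*j*j) := by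
    intro k
    induction k with
    | zero =>
      intro a ha hk
      have hba : b ≤ a := by omega
      rw [PySem.List.pyRange_one_eq_nil hba]
      simp only [pvJScan]
      constructor
      · intro h; exact absurd h (by simp)
      · rintro ⟨j, h1, h2, _⟩; omega
    | succ k ih =>
      intro a ha hk
      have hab' : a < b := by omega
      rw [PySem.List.pyRange_one_cons hab']
      simp only [pvJScan]
      by_cases h1 : n = i + 2*a*a
      · rw [if_pos h1]
        constructor
        · intro _; exact ⟨a, le_refl a, hab', h1⟩
        · intro _; rfl
      · rw [if_neg h1]
        by_cases h2 : n < i + 2*a*a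
        · rw [if_pos h2]
          constructor
          · intro h; exact absurd h (by simp)
          · rintro ⟨j, hj1, hj2, hj3⟩
            -- j ≥ a, j ≠ a (else h1), so j > a ≥ 0, hence 2j² ≥ 2a², contradiction with h2
            have hja : a < j := by
              rcases lt_or_eq_of_le hj1 with h | h
              · exact h
              · exact absurd (h ▸ hj3) h1
            have : a*a ≤ j*j := mul_le_mul (le_of_lt hja) (le_of_lt hja) ha (by omega)
            linarith
        · rw [if_neg h2]
          rw [ih (a+1) (by omega) (by omega)]
          constructor
          · rintro ⟨j, hj1, hj2, hj3⟩; exact ⟨j, by omega, hj2, hj3⟩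
          · rintro ⟨j, hj1, hj2, hj3⟩
            refine ⟨j, ?_, hj2, hj3⟩
            rcases lt_or_eq_of_le hj1 with h | h
            · omega
            · exact absurd (h ▸ hj3) h1
  exact key (b - a).toNat a ha rfl

-- Characterisation of A's outer loop (fuel covers all i with i ≤ k < n).
theorem pvALoop_iff (n : Int) (num : List Bool) :
  ∀ (fuel : Nat) (i : Int), n ≤ i + fuel →
    (pvALoop n num i fuel = true ↔
      ∃ k : Int, i ≤ k ∧ k < n ∧ PySem.List.pyGetD num k false = true ∧
        pvJScan n k (PySem.List.pyRange 1 n 1) = true) := by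
  intro fuel
  induction fuel with
  | zero =>
  intro i hfi
  simp only [pvALoop]
  constructor
  · intro h; exact absurd h (by simp)
  · rintro ⟨k, h1, h2, _⟩
    simp only [Nat.cast_zero, add_zero] at hfi
    omega
  | succ fuel ih =>
  intro i hfi
  simp only [pvALoop]
  by_cases hni : n > i
  · rw [if_pos hni]
    have hrec := ih (i+1) (by push_cast at hfi ⊢; omega)
    by_cases hg : PySem.List.pyGetD num i false = false
    · rw [if_pos hg, hrec]
      constructor
      · rintro ⟨k, h1, h2, h3, h4⟩; exact ⟨k, by omega, h2, h3, h4⟩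
      · rintro ⟨k, h1, h2, h3, h4⟩
        refine ⟨k, ?_, h2, h3, h4⟩
        rcases lt_or_eq_of_le h1 with h | h
        · omega
        · rw [← h] at h3; rw [hg] at h3; exact absurd h3 (by simp)
    · have hg' : PySem.List.pyGetD num i false = true := by
        cases h : PySem.List.pyGetD num i false
        · exact absurd h hg
        · rfl
      rw [if_neg hg]
      by_cases hs : pvJScan n i (PySem.List.pyRange 1 n 1) = true
      · rw [if_pos hs]
        constructor
        · intro _; exact ⟨i, le_refl i, hni, hg', hs⟩
        · intro _; rfl
      · rw [if_neg hs, hrec]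
        simp only [Bool.not_eq_true] at hs
        constructor
        · rintro ⟨k, h1, h2, h3, h4⟩; exact ⟨k, by omega, h2, h3, h4⟩
        · rintro ⟨k, h1, h2, h3, h4⟩
          refine ⟨k, ?_, h2, h3, h4⟩
          rcases lt_or_eq_of_le h1 with h | h
          · omega
          · rw [← h] at h4; rw [hs] at h4; exact absurd h4 (by simp)
  · rw [if_neg hni]
    constructor
    · intro h; exact absurd h (by simp)
    · rintro ⟨k, h1, h2, _⟩; omega

-- Characterisation of B's loop (invariant: n ≤ 2j² + 2·fuel so the fuel never runs out early).
theorem pvBLoop_iff (n : Int) (num : List Bool) :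
  ∀ (fuel : Nat) (j0 : Int), 0 ≤ j0 → n ≤ 2*j0*j0 + 2*fuel →
    (pvBLoop n num j0 fuel = true ↔
      ∃ j : Int, j0 ≤ j ∧ 2 ≤ n - 2*j*j ∧ PySem.List.pyGetD num (n - 2*j*j) false = true) := by
  intro fuel
  induction fuel with
  | zero =>
  intro j0 hj0 hfuel
  simp only [pvBLoop]
  constructor
  · intro h; exact absurd h (by simp)
  · rintro ⟨j, h1, h2, _⟩
    have : j0*j0 ≤ j*j := mul_le_mul h1 h1 hj0 (by omega)
    simp only [Nat.cast_zero, mul_zero, add_zero] at hfuel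
    linarith
  | succ fuel ih =>
  intro j0 hj0 hfuel
  simp only [pvBLoop]
  by_cases hc : 2 ≤ n - 2*j0*j0
  · rw [if_pos hc]
    by_cases hg : PySem.List.pyGetD num (n - 2*j0*j0) false = true
    · rw [if_pos hg]
      constructor
      · intro _; exact ⟨j0, le_refl j0, hc, hg⟩
      · intro _; rfl
    · rw [if_neg hg, ih (j0+1) (by omega) (by push_cast at hfuel ⊢; nlinarith)]
      simp only [Bool.not_eq_true] at hg
      constructor
      · rintro ⟨j, h1, h2, h3⟩; exact ⟨j, by omega, h2, h3⟩
      · rintro ⟨j, h1, h2, h3⟩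
        refine ⟨j, ?_, h2, h3⟩
        rcases lt_or_eq_of_le h1 with h | h
        · omega
        · rw [← h] at h3; rw [hg] at h3; exact absurd h3 (by simp)
  · rw [if_neg hc]
    constructor
    · intro h; exact absurd h (by simp)
    · rintro ⟨j, h1, h2, _⟩
      have : j0*j0 ≤ j*j := mul_le_mul h1 h1 hj0 (by omega)
      linarith

-- ===== VERDICT (by name: the statement is the Claim_ definition above) =====
theorem CanBeWritten_spec : Claim_equal_CanBeWritten := by
  unfold Claim_equal_CanBeWritten
  intro n num _hdom _hpre
  unfold Spec_CanBeWritten CanBeWritten CanBeWritten_alt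
  have hA := pvALoop_iff n num (n-2).toNat 2 (by omega)
  have hB := pvBLoop_iff n num (n-2).toNat 1 (by omega) (by push_cast; omega)
  rw [Bool.eq_iff_iff, hA, hB]
  constructor
  · rintro ⟨k, hk2, hkn, hget, hscan⟩
    rw [pvJScan_iff n k 1 n (by omega)] at hscan
    obtain ⟨j, hj1, hjn, hjeq⟩ := hscan
    refine ⟨j, hj1, by omega, ?_⟩
    have : n - 2*j*j = k := by omega
    rw [this]; exact hget
  · rintro ⟨j, hj1, hval, hget⟩
    refine ⟨n - 2*j*j, by omega, by nlinarith, hget, ?_⟩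
    rw [pvJScan_iff n (n - 2*j*j) 1 n (by omega)]
    refine ⟨j, hj1, ?_, by ring⟩
    nlinarith
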